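-- pv_equiv track=rewrite | github.com/devossa/Graph-theory-coloration-algorithm | Coloration.py | FullGraph
-- ===== SOURCE A (Python) =====
-- def FullGraph(G):
-- 	fg = {}
-- 	for sommet in G:
-- 		fg[sommet] = G[sommet]
-- 		for succ in G[sommet]:
-- 			if succ not in fg:
-- 				if succ not in G:
-- 					fg[succ] = []
-- 				else:
-- 					fg[succ] = G[succ]
-- 	return fg
-- ===== SOURCE B (Python) =====
-- def FullGraph(G):
--     stream = [x for v in G for x in (v, *G[v])]
--     out = []
--     rest = stream
--     while rest:
--         h = rest[0]
--         out.append(h)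
--         rest = [x for x in rest[1:] if x != h]
--     return {k: G.get(k, []) for k in out}
-- ===== Notes on version B (the rewrite author's own statement) =====
-- stated objective: alternative
-- what changed: B flattens the graph into the stream of each vertex followed by its successors, deduplicates that stream by repeatedly taking the head and filtering all its occurrences out of the remainder (no dict or seen-set membership tests), and finally maps each surviving key to its adjacency list in G, or an empty one for dangling successors, whereas A interleaves dict insertion with nested membership branches.
import Mathlib
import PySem

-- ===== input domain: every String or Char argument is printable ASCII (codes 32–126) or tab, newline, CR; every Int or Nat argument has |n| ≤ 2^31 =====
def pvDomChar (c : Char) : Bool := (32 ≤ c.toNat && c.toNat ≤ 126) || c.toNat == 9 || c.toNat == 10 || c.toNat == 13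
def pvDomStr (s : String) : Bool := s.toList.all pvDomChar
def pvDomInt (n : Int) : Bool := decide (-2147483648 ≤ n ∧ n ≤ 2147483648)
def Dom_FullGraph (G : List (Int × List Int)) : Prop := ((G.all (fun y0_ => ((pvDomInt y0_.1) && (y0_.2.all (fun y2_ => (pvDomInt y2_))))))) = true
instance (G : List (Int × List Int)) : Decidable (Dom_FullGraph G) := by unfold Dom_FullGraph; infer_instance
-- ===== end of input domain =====

-- B replaces A's interleaved dict building with: flatten the graph into the stream of each
-- vertex followed by its successors, deduplicate by repeatedly taking the head and filtering
-- its occurrences out of the rest, then map every key to its adjacency (objective: alternative).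

-- ===== PORT A =====
def FullGraph (G : List (Int × List Int)) : List (Int × List Int) :=
  let gd := PySem.Dict.ofList G
  let fg := gd.items.foldl
    (fun fg p =>
      let sommet := p.1
      let fg := fg.insert sommet (gd.getD sommet [])
      (gd.getD sommet []).foldl
        (fun fg succ =>
          if fg.contains succ then fg
          else if gd.contains succ then fg.insert succ (gd.getD succ [])
          else fg.insert succ []) fg)
    PySem.Dict.empty
  fg.items

-- ===== PORT B =====
-- the while loop of Source B: peel the head, append it to out, filter it out of the rest
def pvUniqLoop (out : List Int) (rest : List Int) : List Int :=
  match rest with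
  | [] => out
  | h :: t => pvUniqLoop (out ++ [h]) (t.filter (fun x => x != h))
termination_by rest.length
decreasing_by simpa using Nat.lt_succ_of_le (List.length_filter_le _ _)

def FullGraph_alt (G : List (Int × List Int)) : List (Int × List Int) :=
  let gd := PySem.Dict.ofList G
  let stream := gd.items.flatMap (fun p => p.1 :: gd.getD p.1 [])
  (pvUniqLoop [] stream).map (fun k => (k, gd.getD k []))

-- ===== PRECONDITION & SPEC =====
def Spec_FullGraph (G : List (Int × List Int)) (out : List (Int × List Int)) : Prop := out = FullGraph_alt G
instance (G : List (Int × List Int)) (out : List (Int × List Int)) : Decidable (Spec_FullGraph G out) := by unfold Spec_FullGraph; infer_instance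

-- ===== CLAIM (what is proved, stated in full; the proofs are below) =====
def Claim_equal_FullGraph : Prop := ∀ (G : List (Int × List Int)), Dom_FullGraph G → Spec_FullGraph G (FullGraph G)

-- ===== LEMMAS AND PROOFS =====

def pvF (gd : PySem.Dict Int (List Int)) (k : Int) : Int × List Int := (k, gd.getD k [])

lemma pv_contains_mk_map (gd : PySem.Dict Int (List Int)) (L : List Int) (k : Int) :
    (PySem.Dict.mk (L.map (pvF gd))).contains k = decide (k ∈ L) := by
  rw [PySem.Dict.contains_eq_decide_mem_keys]
  simp [PySem.Dict.keys, pvF]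

lemma pv_insert_mk (gd : PySem.Dict Int (List Int)) (L : List Int) (k : Int) :
    (PySem.Dict.mk (L.map (pvF gd))).insert k (gd.getD k []) =
      PySem.Dict.mk ((PySem.Set.add L k).map (pvF gd)) := by
  apply PySem.Dict.ext
  by_cases hk : k ∈ L
  · rw [PySem.Dict.items_insert_of_contains _ _ (by rw [pv_contains_mk_map]; simpa using hk),
      PySem.Set.add_of_mem hk]
    show (L.map (pvF gd)).map _ = L.map (pvF gd)
    rw [List.map_map]
    apply List.map_congr_left
    intro a _
    by_cases hak : a = k
    · subst hak; simp [pvF]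
    · simp [pvF, hak]
  · rw [PySem.Dict.items_insert_of_not_contains _ _ (by rw [pv_contains_mk_map]; simpa using hk),
      PySem.Set.add_of_not_mem hk]
    show L.map (pvF gd) ++ [(k, gd.getD k [])] = (L ++ [k]).map (pvF gd)
    simp [pvF]

lemma pv_innerA (gd : PySem.Dict Int (List Int)) (xs : List Int) : ∀ (L : List Int),
    xs.foldl (fun fg succ =>
        if fg.contains succ then fg
        else if gd.contains succ then fg.insert succ (gd.getD succ [])
        else fg.insert succ []) (PySem.Dict.mk (L.map (pvF gd))) =
      PySem.Dict.mk ((xs.foldl PySem.Set.add L).map (pvF gd)) := by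
  induction xs with
  | nil => intro L; rfl
  | cons x xs ih =>
    intro L
    have hstep : (if (PySem.Dict.mk (L.map (pvF gd))).contains x then PySem.Dict.mk (L.map (pvF gd))
        else if gd.contains x then (PySem.Dict.mk (L.map (pvF gd))).insert x (gd.getD x [])
        else (PySem.Dict.mk (L.map (pvF gd))).insert x []) =
        PySem.Dict.mk ((PySem.Set.add L x).map (pvF gd)) := by
      rw [pv_contains_mk_map]
      by_cases hx : x ∈ L
      · rw [PySem.Set.add_of_mem hx]
        simp [hx]
      · simp only [hx, decide_false, Bool.false_eq_true, if_false]
        by_cases hg : gd.contains x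
        · rw [if_pos hg, pv_insert_mk]
        · rw [if_neg hg, ← PySem.Dict.getD_of_not_contains gd (k := x) []
            (by simpa using hg), pv_insert_mk]
    simp only [List.foldl_cons, hstep, ih]

lemma pv_outer (gd : PySem.Dict Int (List Int)) (ps : List (Int × List Int)) : ∀ (L : List Int),
    (ps.foldl (fun fg p =>
        (gd.getD p.1 []).foldl (fun fg succ =>
            if fg.contains succ then fg
            else if gd.contains succ then fg.insert succ (gd.getD succ [])
            else fg.insert succ []) (fg.insert p.1 (gd.getD p.1 [])))
        (PySem.Dict.mk (L.map (pvF gd)))).items =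
      (ps.foldl (fun L p => (p.1 :: gd.getD p.1 []).foldl PySem.Set.add L) L).map (pvF gd) := by
  induction ps with
  | nil => intro L; rfl
  | cons p ps ih =>
    intro L
    have hA : ∀ (d : PySem.Dict Int (List Int)), d = PySem.Dict.mk (L.map (pvF gd)) →
        (gd.getD p.1 []).foldl (fun fg succ =>
            if fg.contains succ then fg
            else if gd.contains succ then fg.insert succ (gd.getD succ [])
            else fg.insert succ []) (d.insert p.1 (gd.getD p.1 [])) =
          PySem.Dict.mk ((((p.1 :: gd.getD p.1 []).foldl PySem.Set.add L)).map (pvF gd)) := by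
      intro d hd
      rw [hd, pv_insert_mk, pv_innerA, List.foldl_cons]
    rw [List.foldl_cons, List.foldl_cons, hA _ rfl, ih]

-- seen-set dedup (first occurrences) = B's peel-head-and-filter loop, filtered by the seed
lemma pv_add_eq_uniqLoop (xs : List Int) : ∀ (L : List Int),
    xs.foldl PySem.Set.add L = pvUniqLoop L (xs.filter (fun x => !decide (x ∈ L))) := by
  induction xs with
  | nil => intro L; simp [pvUniqLoop]
  | cons x xs ih =>
    intro L
    by_cases hx : x ∈ L
    · rw [List.foldl_cons, PySem.Set.add_of_mem hx]
      simpa [hx] using ih L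
    · rw [List.foldl_cons, PySem.Set.add_of_not_mem hx]
      have hfil : (xs.filter (fun y => !decide (y ∈ L))).filter (fun y => y != x) =
          xs.filter (fun y => !decide (y ∈ L ++ [x])) := by
        rw [List.filter_filter]
        apply List.filter_congr
        intro y _
        by_cases hyx : y = x
        · subst hyx; simp
        · simp [bne, hyx]
      have : pvUniqLoop L ((x :: xs).filter (fun y => !decide (y ∈ L))) =
          pvUniqLoop (L ++ [x]) (xs.filter (fun y => !decide (y ∈ L ++ [x]))) := by
        rw [List.filter_cons_of_pos (by simp [hx]), pvUniqLoop, hfil]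
      rw [this, ih]

lemma pv_foldl_flatMap (f : Int × List Int → List Int) (ps : List (Int × List Int)) :
    ∀ (L : List Int),
    ps.foldl (fun L p => (f p).foldl PySem.Set.add L) L = (ps.flatMap f).foldl PySem.Set.add L := by
  induction ps with
  | nil => intro L; rfl
  | cons p ps ih => intro L; rw [List.foldl_cons, List.flatMap_cons, List.foldl_append, ih]

-- ===== VERDICT (by name: the statement is the Claim_ definition above) =====
theorem FullGraph_spec : Claim_equal_FullGraph := by
  intro G _
  show FullGraph G = FullGraph_alt G
  unfold FullGraph FullGraph_alt
  have h := pv_outer (PySem.Dict.ofList G) (PySem.Dict.ofList G).items []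
  rw [pv_foldl_flatMap (fun p => p.1 :: (PySem.Dict.ofList G).getD p.1 []),
      pv_add_eq_uniqLoop] at h
  simpa [pvF] using h
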